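-- pv_equiv track=rewrite | github.com/jrfonseca/xdot.py | xdot/ui/_xdotparser.py | interpret_esc_nl
-- ===== SOURCE A (Python) =====
-- from typing import Union
--
-- def interpret_esc_nl(esc_string: Union[str, None]):
--     r"""Interpret newline escape sequences.
--
--     \n, \l and \r are replaced with newlines, other escaped
--     characters such as \\ with themselves.
--     """
--     if esc_string is None:
--         return None
--     result = ""
--     was_escape = False
--     for ch in esc_string:
--         if was_escape:
--             was_escape = False
--             if ch in ['n', 'l', 'r']:
--                 result += "\n"
--             else:
--                 result += ch
--         else:
--             if ch == "\\":
--                 was_escape = True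
--             else:
--                 result += ch
--     return result
-- ===== SOURCE B (Python) =====
-- import re
--
-- def interpret_esc_nl(esc_string):
--     if esc_string is None:
--         return None
--     def repl(m):
--         g = m.group(1)
--         if g is None:
--             return ""
--         return "\n" if g in ('n', 'l', 'r') else g
--     return re.sub(r'\\(.)?', repl, esc_string, flags=re.DOTALL)
-- ===== Notes on version B (the rewrite author's own statement) =====
-- stated objective: faster
-- what changed: Replaced the hand-written was_escape state machine (with quadratic string +=) by a single re.sub over the pattern \\(.)? whose replacement function maps n/l/r to newline, any other escaped char to itself, and a trailing lone backslash to the empty string.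
import Mathlib
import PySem

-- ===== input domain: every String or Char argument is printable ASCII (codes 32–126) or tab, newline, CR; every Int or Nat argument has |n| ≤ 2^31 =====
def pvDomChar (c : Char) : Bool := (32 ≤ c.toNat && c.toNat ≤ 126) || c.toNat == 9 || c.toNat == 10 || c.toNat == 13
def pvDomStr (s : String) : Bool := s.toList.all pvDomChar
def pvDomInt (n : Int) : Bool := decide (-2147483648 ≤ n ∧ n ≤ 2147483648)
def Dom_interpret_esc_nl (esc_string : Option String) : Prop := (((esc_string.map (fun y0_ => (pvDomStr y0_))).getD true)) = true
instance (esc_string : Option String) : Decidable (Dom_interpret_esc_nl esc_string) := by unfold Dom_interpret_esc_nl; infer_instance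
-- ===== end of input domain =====

-- ===== PORT A =====
-- A: explicit was_escape state machine, result accumulated left to right.
def interpret_esc_nl (esc_string : Option String) : Option String :=
  match esc_string with
  | none => none
  | some s =>
    let st := s.toList.foldl
      (fun (st : List Char × Bool) ch =>
        if st.2 then
          (st.1 ++ [if ch = 'n' ∨ ch = 'l' ∨ ch = 'r' then '\n' else ch], false)
        else if ch = '\\' then (st.1, true)
        else (st.1 ++ [ch], false))
      ([], false)
    some (String.mk st.1)

-- ===== PORT B =====
-- B: one idiomatic re.sub over r'\\(.)?' (DOTALL); the regex engine's left-to-right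
-- non-overlapping scan is transliterated as this structural recursion.
def escRepl (c : Char) : List Char :=
  if c = 'n' ∨ c = 'l' ∨ c = 'r' then ['\n'] else [c]

def escSub : List Char → List Char
  | [] => []
  | [c] => if c = '\\' then [] else [c]         -- trailing lone backslash: group is None, replaced by ""
  | c :: d :: rest =>
    if c = '\\' then escRepl d ++ escSub rest
    else c :: escSub (d :: rest)

def interpret_esc_nl_alt (esc_string : Option String) : Option String :=
  match esc_string with
  | none => none
  | some s => some (String.mk (escSub s.toList))

-- ===== PRECONDITION & SPEC =====
def Spec_interpret_esc_nl (esc_string : Option String) (out : Option String) : Prop := out = interpret_esc_nl_alt esc_string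
instance (esc_string : Option String) (out : Option String) : Decidable (Spec_interpret_esc_nl esc_string out) := by unfold Spec_interpret_esc_nl; infer_instance

-- ===== CLAIM (what is proved, stated in full; the proofs are below) =====
def Claim_equal_interpret_esc_nl : Prop := ∀ (esc_string : Option String), Dom_interpret_esc_nl esc_string → Spec_interpret_esc_nl esc_string (interpret_esc_nl esc_string)

-- ===== LEMMAS AND PROOFS =====
def escStep (st : List Char × Bool) (ch : Char) : List Char × Bool :=
  if st.2 then
    (st.1 ++ [if ch = 'n' ∨ ch = 'l' ∨ ch = 'r' then '\n' else ch], false)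
  else if ch = '\\' then (st.1, true)
  else (st.1 ++ [ch], false)

theorem foldl_escStep_eq_escSub :
    ∀ (l acc : List Char), (l.foldl escStep (acc, false)).1 = acc ++ escSub l
  | [], acc => by simp [escSub]
  | [c], acc => by
    by_cases h : c = '\\' <;>
      simp [escSub, escStep, h]
  | c :: d :: rest, acc => by
    by_cases h : c = '\\'
    · have hd := foldl_escStep_eq_escSub rest (acc ++ escRepl d)
      by_cases hn : d = 'n' ∨ d = 'l' ∨ d = 'r' <;>
        simp_all [escSub, escStep, escRepl]
    · have := foldl_escStep_eq_escSub (d :: rest) (acc ++ [c])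
      simp_all [escSub, escStep]

-- ===== VERDICT (by name: the statement is the Claim_ definition above) =====
theorem interpret_esc_nl_spec : Claim_equal_interpret_esc_nl := by
  intro esc_string _
  unfold Spec_interpret_esc_nl
  cases esc_string with
  | none => rfl
  | some s =>
    show some (String.mk (s.toList.foldl escStep ([], false)).1) = _
    rw [foldl_escStep_eq_escSub s.toList []]
    rfl
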